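-- pv_equiv track=rewrite | github.com/DhruvTrehan03/Bending | BendingSim/mesh_generation.py | _branching_tree_node_count
-- ===== SOURCE A (Python) =====
-- def _branching_tree_node_count(field_shape_cfg):
--     max_children = int(max(1, field_shape_cfg.get("branching_max_children", 2)))
--     depth_max = int(max(0, field_shape_cfg.get("branching_depth_max", 5)))
--
--     node_count = 0
--     nodes_this_level = 1
--     for _depth in range(depth_max + 1):
--         node_count += nodes_this_level
--         nodes_this_level *= max_children
--
--     return node_count
-- ===== SOURCE B (Python) =====
-- def _cfg_int(cfg, key, default, lo):
--     v = cfg.get(key, default)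
--     return lo if v < lo else int(v)
--
--
-- def _ipow(base, exp):
--     # exponentiation by squaring (recursive)
--     if exp == 0:
--         return 1
--     half = _ipow(base, exp // 2)
--     return half * half * (base if exp % 2 else 1)
--
--
-- def _branching_tree_node_count(field_shape_cfg):
--     c = _cfg_int(field_shape_cfg, "branching_max_children", 2, 1)
--     d = _cfg_int(field_shape_cfg, "branching_depth_max", 5, 0)
--     if c == 1:
--         return d + 1
--     return (_ipow(c, d + 1) - 1) // (c - 1)
-- ===== Notes on version B (the rewrite author's own statement) =====
-- stated objective: alternative
-- what changed: Replaces the level-by-level accumulation loop with the closed-form geometric-series sum computed via recursive exponentiation by squaring (with a clamped-config helper and a special case for branching factor 1).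
import Mathlib
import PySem

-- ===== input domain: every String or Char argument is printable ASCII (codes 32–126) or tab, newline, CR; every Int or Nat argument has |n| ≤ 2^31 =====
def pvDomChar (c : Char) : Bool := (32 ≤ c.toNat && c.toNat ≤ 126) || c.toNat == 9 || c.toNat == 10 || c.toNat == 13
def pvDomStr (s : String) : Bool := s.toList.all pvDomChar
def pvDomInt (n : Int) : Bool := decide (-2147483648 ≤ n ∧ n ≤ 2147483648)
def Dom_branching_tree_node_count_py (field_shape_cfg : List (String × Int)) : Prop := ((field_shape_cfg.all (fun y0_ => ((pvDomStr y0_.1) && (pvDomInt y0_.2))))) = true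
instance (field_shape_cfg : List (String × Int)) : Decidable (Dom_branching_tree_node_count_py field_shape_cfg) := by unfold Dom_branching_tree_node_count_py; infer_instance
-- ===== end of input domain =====

-- B: closed-form geometric-series sum via recursive exponentiation by squaring (alternative decomposition, no loop).

-- ===== PORT A =====
-- dict.get(k, default) on the association list: first match, else the default
def branching_tree_node_count_py (field_shape_cfg : List (String × Int)) : Int :=
  let max_children : Int := max 1 ((field_shape_cfg.lookup "branching_max_children").getD 2)
  let depth_max : Int := max 0 ((field_shape_cfg.lookup "branching_depth_max").getD 5)
  let final := (PySem.List.pyRange 0 (depth_max + 1) 1).foldl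
    (fun (st : Int × Int) _ => (st.1 + st.2, st.2 * max_children)) (0, 1)
  final.1

-- ===== PORT B =====
-- helper: config value clamped below at lo
def pvCfgInt (cfg : List (String × Int)) (key : String) (default lo : Int) : Int :=
  let v := (cfg.lookup key).getD default
  if v < lo then lo else v

-- helper: exponentiation by squaring, recursive as in Source B
def pvIpow (base : Int) (exp : Nat) : Int :=
  if exp = 0 then 1
  else
    let half := pvIpow base (exp / 2)
    half * half * (if exp % 2 = 1 then base else 1)
decreasing_by exact Nat.div_lt_self (by omega) (by norm_num)

def branching_tree_node_count_py_alt (field_shape_cfg : List (String × Int)) : Int :=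
  let c := pvCfgInt field_shape_cfg "branching_max_children" 2 1
  let d := pvCfgInt field_shape_cfg "branching_depth_max" 5 0
  if c = 1 then d + 1
  else PySem.Int.floordiv (pvIpow c (d + 1).toNat - 1) (c - 1)

-- ===== PRECONDITION & SPEC =====
def Spec_branching_tree_node_count_py (field_shape_cfg : List (String × Int)) (out : Int) : Prop := out = branching_tree_node_count_py_alt field_shape_cfg
instance (field_shape_cfg : List (String × Int)) (out : Int) : Decidable (Spec_branching_tree_node_count_py field_shape_cfg out) := by unfold Spec_branching_tree_node_count_py; infer_instance

-- ===== CLAIM (what is proved, stated in full; the proofs are below) =====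
def Claim_equal_branching_tree_node_count_py : Prop := ∀ (field_shape_cfg : List (String × Int)), Dom_branching_tree_node_count_py field_shape_cfg → Spec_branching_tree_node_count_py field_shape_cfg (branching_tree_node_count_py field_shape_cfg)

-- ===== LEMMAS AND PROOFS =====
-- ipow by squaring computes the power
lemma pvIpow_eq (b : Int) (e : Nat) : pvIpow b e = b ^ e := by
  induction e using Nat.strong_induction_on with
  | _ e ih =>
    rw [pvIpow]
    by_cases h : e = 0
    · simp [h]
    · have ih2 := ih (e / 2) (Nat.div_lt_self (by omega) (by norm_num))
      simp only [h, if_false, ih2]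
      have he : e = e / 2 + e / 2 + e % 2 := by omega
      rcases Nat.mod_two_eq_zero_or_one e with h2 | h2
      · simp only [h2, if_neg (by omega : ¬ (0 = 1))]
        rw [mul_one, ← pow_add]; congr 1; omega
      · simp only [h2, if_true]
        rw [← pow_add, ← pow_succ]; congr 1; omega

-- the clamp helper is max
lemma pvCfgInt_eq (cfg : List (String × Int)) (key : String) (default lo : Int) :
    pvCfgInt cfg key default lo = max lo ((cfg.lookup key).getD default) := by
  unfold pvCfgInt
  by_cases h : (cfg.lookup key).getD default < lo <;> simp [max_def, h]

-- the loop's invariant: after folding over any list, the state is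
-- (nc + ntl * geometric sum, ntl * mc^length)
lemma btnc_loop (mc : Int) (l : List Int) (nc ntl : Int) :
    l.foldl (fun (st : Int × Int) _ => (st.1 + st.2, st.2 * mc)) (nc, ntl)
      = (nc + ntl * (∑ i ∈ Finset.range l.length, mc ^ i), ntl * mc ^ l.length) := by
  induction l generalizing nc ntl with
  | nil => simp
  | cons x xs ih =>
      simp only [List.foldl_cons, ih, List.length_cons]
      rw [Prod.mk.injEq]
      refine ⟨?_, by rw [pow_succ]; ring⟩
      rw [geom_sum_succ]; ring

lemma btnc_sum (mc d : Int) (hmc : 1 ≤ mc) (hd : 0 ≤ d) :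
    (∑ i ∈ Finset.range (d + 1).toNat, mc ^ i)
      = if mc = 1 then d + 1
        else PySem.Int.floordiv (mc ^ (d + 1).toNat - 1) (mc - 1) := by
  split_ifs with h1
  · subst h1; simp; omega
  · have hpos : 0 < mc - 1 := by omega
    rw [PySem.Int.floordiv_eq_ediv_of_pos hpos, ← geom_sum_mul,
      Int.mul_ediv_cancel _ (by omega)]

-- ===== VERDICT (by name: the statement is the Claim_ definition above) =====
theorem branching_tree_node_count_py_spec : Claim_equal_branching_tree_node_count_py := by
  intro cfg _
  unfold Spec_branching_tree_node_count_py branching_tree_node_count_py branching_tree_node_count_py_alt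
  rw [pvCfgInt_eq, pvCfgInt_eq]
  set mc : Int := max 1 ((cfg.lookup "branching_max_children").getD 2) with hmc
  set d : Int := max 0 ((cfg.lookup "branching_depth_max").getD 5) with hd
  have h1 : 1 ≤ mc := le_max_left _ _
  have h0 : 0 ≤ d := le_max_left _ _
  simp only [btnc_loop, PySem.List.length_pyRange_one, pvIpow_eq]
  rw [show d + 1 - 0 = d + 1 by ring, one_mul, zero_add, btnc_sum mc d h1 h0]
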